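-- pv_equiv track=rewrite | github.com/YuryInAHurry/Timeline2Sheets | timeline_complete_public.py | _get_headers
-- ===== SOURCE A (Python) =====
-- from typing import List, Dict, Any, Optional
--
-- def _get_headers(records: List[Dict[str, Any]]) -> List[str]:
--     """Determine appropriate headers based on records"""
--     all_keys = set()
--     for record in records:
--         all_keys.update(record.keys())
--
--     priority_fields = [
--         'type', 'start_time', 'end_time', 'duration_minutes',
--         'place_name', 'address', 'semantic_type', 'place_id', 'probability',
--         'visit_confidence', 'hierarchy_level', 'activity_type', 'activity_confidence',
--         'distance_km', 'distance_meters', 'start_address', 'end_address',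
--         'lat', 'lng', 'start_lat', 'start_lng', 'end_lat', 'end_lng',
--         'num_points', 'first_point_lat', 'first_point_lng', 'last_point_lat', 'last_point_lng',
--     ]
--
--     headers = []
--     for field in priority_fields:
--         if field in all_keys:
--             headers.append(field)
--             all_keys.remove(field)
--
--     headers.extend(sorted(all_keys))
--     return headers
-- ===== SOURCE B (Python) =====
-- def _get_headers(records):
--     """Determine appropriate headers based on records"""
--     priority_fields = [
--         'type', 'start_time', 'end_time', 'duration_minutes',
--         'place_name', 'address', 'semantic_type', 'place_id', 'probability',
--         'visit_confidence', 'hierarchy_level', 'activity_type', 'activity_confidence',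
--         'distance_km', 'distance_meters', 'start_address', 'end_address',
--         'lat', 'lng', 'start_lat', 'start_lng', 'end_lat', 'end_lng',
--         'num_points', 'first_point_lat', 'first_point_lng', 'last_point_lat', 'last_point_lng',
--     ]
--     rank = {field: i for i, field in enumerate(priority_fields)}
--     sentinel = len(priority_fields)
--
--     all_keys = set()
--     for record in records:
--         all_keys.update(record.keys())
--
--     return sorted(all_keys, key=lambda k: (rank.get(k, sentinel), k))
-- ===== Notes on version B (the rewrite author's own statement) =====
-- stated objective: simpler
-- what changed: Replaces A's two-phase construction (mutating priority loop over a set, then appending the sorted leftovers) by a single sort of the key-union under the lexicographic key (priority rank with sentinel, key name), the rank dict being built once from enumerate(priority_fields).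
import Mathlib
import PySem

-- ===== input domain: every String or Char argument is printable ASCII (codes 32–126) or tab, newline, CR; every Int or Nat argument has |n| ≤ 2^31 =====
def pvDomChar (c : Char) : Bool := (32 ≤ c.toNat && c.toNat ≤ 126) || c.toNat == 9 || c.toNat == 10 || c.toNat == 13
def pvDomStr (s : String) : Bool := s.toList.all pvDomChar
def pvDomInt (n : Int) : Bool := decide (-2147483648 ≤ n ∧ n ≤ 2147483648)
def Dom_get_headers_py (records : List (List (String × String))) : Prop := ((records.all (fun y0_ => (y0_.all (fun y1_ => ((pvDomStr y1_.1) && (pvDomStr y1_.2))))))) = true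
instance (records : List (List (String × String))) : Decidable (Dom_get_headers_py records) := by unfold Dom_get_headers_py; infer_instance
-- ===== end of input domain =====

-- B replaces A's two-phase build (mutating priority loop + sorted tail) by ONE sort of the
-- key-union under the lexicographic key (priority rank with sentinel, name): objective 'simpler'.

-- ===== PORT A =====
-- the priority_fields literal both Pythons contain verbatim
def pvPriorityFields : List String :=
  ["type", "start_time", "end_time", "duration_minutes",
   "place_name", "address", "semantic_type", "place_id", "probability",
   "visit_confidence", "hierarchy_level", "activity_type", "activity_confidence",
   "distance_km", "distance_meters", "start_address", "end_address",
   "lat", "lng", "start_lat", "start_lng", "end_lat", "end_lng",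
   "num_points", "first_point_lat", "first_point_lng", "last_point_lat", "last_point_lng"]

-- 'all_keys = set(); for record in records: all_keys.update(record.keys())' (identical in A and B)
def pvAllKeys (records : List (List (String × String))) : PySem.Set String :=
  records.foldl (fun s record => PySem.Set.update s (record.map Prod.fst)) PySem.Set.empty

def get_headers_py (records : List (List (String × String))) : List String :=
  let all_keys := pvAllKeys records
  -- 'for field in priority_fields: if field in all_keys: headers.append(field); all_keys.remove(field)'
  -- (remove under the membership guard is exactly Set.discard)
  let st := pvPriorityFields.foldl
    (fun (st : List String × PySem.Set String) field =>
      if PySem.Set.contains st.2 field then (st.1 ++ [field], PySem.Set.discard st.2 field) else st)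
    ([], all_keys)
  st.1 ++ PySem.List.sorted st.2 (fun x => x)

-- ===== PORT B =====
-- 'rank = {field: i for i, field in enumerate(priority_fields)}'
def pvRank : PySem.Dict String Int :=
  (PySem.List.enumerate pvPriorityFields).foldl (fun d p => d.insert p.2 p.1) PySem.Dict.empty

def get_headers_py_alt (records : List (List (String × String))) : List String :=
  -- 'sorted(all_keys, key=lambda k: (rank.get(k, sentinel), k))'
  PySem.List.sorted2 (pvAllKeys records)
    (fun k => pvRank.getD k (pvPriorityFields.length : Int)) (fun k => k)

-- ===== PRECONDITION & SPEC =====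
def Spec_get_headers_py (records : List (List (String × String))) (out : List String) : Prop := out = get_headers_py_alt records
instance (records : List (List (String × String))) (out : List String) : Decidable (Spec_get_headers_py records out) := by unfold Spec_get_headers_py; infer_instance

-- ===== CLAIM (what is proved, stated in full; the proofs are below) =====
def Claim_equal_get_headers_py : Prop := ∀ (records : List (List (String × String))), Dom_get_headers_py records → Spec_get_headers_py records (get_headers_py records)

-- ===== LEMMAS AND PROOFS =====
-- `insertBy` only depends on the comparison pointwise
theorem pv_insertBy_congr {α : Type} (f g : α → α → Bool) (x : α) (l : List α)
    (h : ∀ a b, f a b = g a b) : PySem.List.insertBy f x l = PySem.List.insertBy g x l := by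
  induction l with
  | nil => rfl
  | cons y ys ih => simp [PySem.List.insertBy, h, ih]

-- sorted2 with identity second key IS sorted under the lexicographic pair key
theorem pv_sorted2_eq_sorted_lex (xs : List String) (k1 : String → Int) :
    PySem.List.sorted2 xs k1 (fun k => k)
      = PySem.List.sorted xs (fun x => toLex ((k1 x : Int), x)) := by
  unfold PySem.List.sorted2 PySem.List.sorted
  simp only [if_neg (by decide : ¬ (false = true))]
  induction xs using List.reverseRecOn with
  | nil => rfl
  | append_singleton ys y ih =>
      rw [List.foldl_append, List.foldl_append, ih]
      simp only [List.foldl]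
      apply pv_insertBy_congr
      intro a b
      have hlex : (toLex (k1 a, a) < toLex (k1 b, b)) ↔ (k1 a < k1 b ∨ (k1 a = k1 b ∧ a < b)) :=
        Prod.Lex.lt_iff
      by_cases h1 : k1 a < k1 b
      · simp [h1, hlex]
      · by_cases h2 : k1 b < k1 a
        · have : ¬ (k1 a = k1 b) := by omega
          simp [h1, h2, hlex, this]
        · have he : k1 a = k1 b := by omega
          by_cases h3 : a < b
          · simp [h3, he]
            exact Prod.Lex.lt_iff.mpr (Or.inr ⟨rfl, h3⟩)
          · simp [h3, he]
            exact Prod.Lex.le_iff.mpr (Or.inr ⟨rfl, le_of_not_gt h3⟩)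

-- A's priority loop, characterised: over distinct fields it appends the present fields in
-- field order and drops exactly those fields from the set
theorem pv_loopA (fs : List String) (h : List String) (s : PySem.Set String) (hnd : fs.Nodup) :
    fs.foldl (fun (st : List String × PySem.Set String) field =>
        if PySem.Set.contains st.2 field then (st.1 ++ [field], PySem.Set.discard st.2 field) else st)
      (h, s)
      = (h ++ fs.filter (fun f => PySem.Set.contains s f),
         s.filter (fun k => !(fs.contains k))) := by
  induction fs generalizing h s with
  | nil => simp
  | cons f rest ih =>
      rcases List.nodup_cons.mp hnd with ⟨hf, hrest⟩
      simp only [List.foldl_cons]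
      by_cases hc : PySem.Set.contains s f = true
      · rw [if_pos hc, ih _ _ hrest]
        simp only [Prod.mk.injEq]
        refine ⟨?_, ?_⟩
        · have hfil : List.filter (fun g => (PySem.Set.discard s f).contains g) rest
              = List.filter (fun g => PySem.Set.contains s g) rest := by
            apply List.filter_congr
            intro g hg
            have hgf : g ≠ f := fun e => hf (e ▸ hg)
            have h1 : (PySem.Set.discard s f).contains g = true ↔ g ∈ s := by
              simp [PySem.Set.mem_discard, hgf]
            have h2 : PySem.Set.contains s g = true ↔ g ∈ s := by simp
            rw [Bool.eq_iff_iff, h1, h2]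
          rw [List.filter_cons_of_pos hc, hfil]
          have : List.filter (fun g => decide (g ∈ s)) rest = List.filter (fun g => s.contains g) rest := by
            apply List.filter_congr
            intro g _
            simp
          simp [this]
        · rw [show PySem.Set.discard s f = s.filter (fun y => !(y == f)) from rfl,
              List.filter_filter]
          apply List.filter_congr
          intro k _
          simp only [Bool.not_or, List.contains_cons]
          rw [Bool.and_comm]
      · rw [if_neg hc, ih _ _ hrest]
        have hfs : f ∉ s := fun hm => hc (by simp [hm])
        simp only [Prod.mk.injEq]
        refine ⟨?_, ?_⟩
        · rw [List.filter_cons_of_neg (by simpa using hc)]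
        · apply List.filter_congr
          intro k hk
          have hkf : k ≠ f := fun e => hfs (e ▸ hk)
          simp [hkf]

theorem pv_nodup_foldl_update (recs : List (List (String × String))) (s : PySem.Set String)
    (hs : s.Nodup) :
    (recs.foldl (fun s record => PySem.Set.update s (record.map Prod.fst)) s).Nodup := by
  induction recs generalizing s with
  | nil => exact hs
  | cons r rs ih => exact ih _ (PySem.Set.nodup_update _ _ hs)

theorem pv_nodup_allKeys (records : List (List (String × String))) : (pvAllKeys records).Nodup :=
  pv_nodup_foldl_update records PySem.Set.empty List.nodup_nil

set_option maxRecDepth 8192 in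
theorem pv_priority_nodup : pvPriorityFields.Nodup := by decide

set_option maxRecDepth 8192 in
theorem pv_rank_keys : pvRank.keys = pvPriorityFields := by decide

set_option maxRecDepth 8192 in
theorem pv_rank_mono :
    List.Pairwise (fun a b => pvRank.getD a 28 < pvRank.getD b 28) pvPriorityFields := by decide

set_option maxRecDepth 8192 in
theorem pv_rank_lt : ∀ f ∈ pvPriorityFields, pvRank.getD f 28 < 28 := by decide

theorem pv_rank_notmem (k : String) (hk : k ∉ pvPriorityFields) : pvRank.getD k 28 = 28 := by
  have hc : pvRank.contains k = false := by
    rw [PySem.Dict.contains_eq_decide_mem_keys, pv_rank_keys]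
    simp [hk]
  exact PySem.Dict.getD_of_not_contains _ _ hc

theorem pv_main (records : List (List (String × String))) :
    get_headers_py records = get_headers_py_alt records := by
  show (let all_keys := pvAllKeys records;
    let st := List.foldl (fun (st : List String × PySem.Set String) field =>
        if PySem.Set.contains st.2 field then (st.1 ++ [field], PySem.Set.discard st.2 field) else st)
      ([], all_keys) pvPriorityFields;
    st.1 ++ PySem.List.sorted st.2 (fun x => x)) = _
  simp only []
  rw [show get_headers_py_alt records
        = PySem.List.sorted2 (pvAllKeys records)
            (fun k => pvRank.getD k (pvPriorityFields.length : Int)) (fun k => k) from rfl]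
  rw [pv_loopA _ _ _ pv_priority_nodup, pv_sorted2_eq_sorted_lex]
  simp only [show ((pvPriorityFields.length : Int)) = 28 from by decide]
  set S := pvAllKeys records with hSdef
  set key : String → Lex (Int × String) := fun x => toLex ((pvRank.getD x 28 : Int), x) with hkey
  set P := pvPriorityFields.filter (fun f => PySem.Set.contains S f) with hP
  set R := S.filter (fun k => !(pvPriorityFields.contains k)) with hR
  set sortedR := PySem.List.sorted R (fun x => x) with hsR
  have hSnd : S.Nodup := pv_nodup_allKeys records
  have hPnd : P.Nodup := pv_priority_nodup.filter _
  have hRnd : R.Nodup := hSnd.filter _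
  have hsRnd : sortedR.Nodup := (PySem.List.sorted_perm R (fun x => x) false).nodup_iff.mpr hRnd
  have hmemP : ∀ x, x ∈ P ↔ x ∈ pvPriorityFields ∧ x ∈ S := by
    intro x; rw [hP, List.mem_filter]; simp
  have hmemsR : ∀ x, x ∈ sortedR ↔ x ∈ S ∧ x ∉ pvPriorityFields := by
    intro x; rw [hsR, PySem.List.mem_sorted, hR, List.mem_filter]; simp
  have hperm : (P ++ sortedR).Perm S := by
    apply (List.perm_ext_iff_of_nodup ?_ hSnd).mpr
    · intro x
      simp only [List.mem_append, hmemP x, hmemsR x]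
      constructor
      · rintro (⟨_, hx⟩ | ⟨hx, _⟩) <;> exact hx
      · intro hx
        by_cases hp : x ∈ pvPriorityFields
        · exact Or.inl ⟨hp, hx⟩
        · exact Or.inr ⟨hx, hp⟩
    · rw [List.nodup_append]
      refine ⟨hPnd, hsRnd, ?_⟩
      intro a haP b hbsR
      exact fun hab => ((hmemsR b).mp hbsR).2 (hab ▸ ((hmemP a).mp haP).1)
  have hpair : List.Pairwise (fun a b => key a < key b) (P ++ sortedR) := by
    rw [List.pairwise_append]
    refine ⟨?_, ?_, ?_⟩
    · exact (pv_rank_mono.filter _).imp (fun h => Prod.Lex.lt_iff.mpr (Or.inl h))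
    · have hle : List.Pairwise (fun a b : String => a ≤ b) sortedR :=
        PySem.List.sorted_pairwise R (fun x => x)
      have hlt : List.Pairwise (fun a b : String => a < b) sortedR :=
        (hle.and hsRnd).imp (fun h => lt_of_le_of_ne h.1 h.2)
      apply hlt.imp_of_mem
      intro a b ha hb hab
      have h28a := pv_rank_notmem a ((hmemsR a).mp ha).2
      have h28b := pv_rank_notmem b ((hmemsR b).mp hb).2
      exact Prod.Lex.lt_iff.mpr (Or.inr ⟨show pvRank.getD a 28 = pvRank.getD b 28 by rw [h28a, h28b], hab⟩)
    · intro a haP b hbsR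
      have h28b := pv_rank_notmem b ((hmemsR b).mp hbsR).2
      have hlt := pv_rank_lt a ((hmemP a).mp haP).1
      exact Prod.Lex.lt_iff.mpr (Or.inl (show pvRank.getD a 28 < pvRank.getD b 28 by rw [h28b]; exact hlt))
  have := PySem.List.sorted_eq_of_perm_of_pairwise_lt S (P ++ sortedR) key hperm hpair
  rw [this]
  simp

-- ===== VERDICT (by name: the statement is the Claim_ definition above) =====
theorem get_headers_py_spec : Claim_equal_get_headers_py := by
  intro records _
  unfold Spec_get_headers_py
  exact pv_main records
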